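-- pv_equiv track=rewrite | github.com/aprem01/CardioAuth | cardioauth/engines/p2p_prevention.py | _has_medication_trial
-- ===== SOURCE A (Python) =====
-- from typing import Any
--
-- def _has_medication_trial(chart: dict[str, Any]) -> bool:
--     """Check if chart documents a medication trial of adequate duration."""
--     meds = chart.get("relevant_medications", [])
--     if not meds:
--         return False
--     cardiac_keywords = [
--         "metoprolol", "atenolol", "carvedilol", "bisoprolol",  # beta-blockers
--         "amlodipine", "diltiazem", "verapamil", "nifedipine",  # CCBs
--         "nitroglycerin", "isosorbide", "ranolazine",           # anti-anginals
--         "lisinopril", "enalapril", "ramipril", "losartan", "valsartan",  # ACEi/ARBs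
--         "atorvastatin", "rosuvastatin", "pravastatin",         # statins
--         "aspirin", "clopidogrel", "ticagrelor", "prasugrel",   # antiplatelets
--         "warfarin", "apixaban", "rivaroxaban", "edoxaban",     # anticoagulants
--         "amiodarone", "flecainide", "sotalol", "dofetilide",   # antiarrhythmics
--         "furosemide", "bumetanide", "spironolactone", "eplerenone",  # diuretics
--         "sacubitril", "hydralazine", "digoxin", "ivabradine",  # HF meds
--     ]
--     for med in meds:
--         med_name = med.get("name", "").lower()
--         if any(kw in med_name for kw in cardiac_keywords):
--             return True
--     return False
-- ===== SOURCE B (Python) =====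
-- from typing import Any
--
-- _CARDIAC_KEYWORDS = [
--     "metoprolol", "atenolol", "carvedilol", "bisoprolol",
--     "amlodipine", "diltiazem", "verapamil", "nifedipine",
--     "nitroglycerin", "isosorbide", "ranolazine",
--     "lisinopril", "enalapril", "ramipril", "losartan", "valsartan",
--     "atorvastatin", "rosuvastatin", "pravastatin",
--     "aspirin", "clopidogrel", "ticagrelor", "prasugrel",
--     "warfarin", "apixaban", "rivaroxaban", "edoxaban",
--     "amiodarone", "flecainide", "sotalol", "dofetilide",
--     "furosemide", "bumetanide", "spironolactone", "eplerenone",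
--     "sacubitril", "hydralazine", "digoxin", "ivabradine",
-- ]
--
-- def _has_medication_trial(chart: dict[str, Any]) -> bool:
--     """Check if chart documents a medication trial of adequate duration."""
--     # One newline-joined lowercased corpus of all med names; keywords are pure
--     # lowercase letters, so a keyword match can never straddle the separator.
--     corpus = "\n".join(
--         med.get("name", "").lower()
--         for med in chart.get("relevant_medications", [])
--     )
--     return any(kw in corpus for kw in _CARDIAC_KEYWORDS)
-- ===== Notes on version B (the rewrite author's own statement) =====
-- stated objective: alternative
-- what changed: Instead of a per-med loop with an inner any(kw in name) scan, B joins all lowercased med names into one newline-separated corpus and tests each keyword once against that single string (keywords are pure lowercase letters, so no match can straddle the separator).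
import Mathlib
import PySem

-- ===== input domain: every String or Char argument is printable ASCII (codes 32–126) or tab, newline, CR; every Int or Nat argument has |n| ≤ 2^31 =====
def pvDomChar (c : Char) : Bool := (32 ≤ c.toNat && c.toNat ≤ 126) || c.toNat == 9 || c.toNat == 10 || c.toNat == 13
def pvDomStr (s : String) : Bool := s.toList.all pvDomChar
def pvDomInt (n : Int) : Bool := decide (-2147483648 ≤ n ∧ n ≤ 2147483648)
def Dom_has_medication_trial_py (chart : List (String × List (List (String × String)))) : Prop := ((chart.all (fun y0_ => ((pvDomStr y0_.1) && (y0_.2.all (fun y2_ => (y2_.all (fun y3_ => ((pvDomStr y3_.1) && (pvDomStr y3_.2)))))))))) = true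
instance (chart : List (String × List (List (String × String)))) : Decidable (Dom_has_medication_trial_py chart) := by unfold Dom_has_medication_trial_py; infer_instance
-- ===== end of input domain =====

-- B replaces A's med-major loop (inner any(kw in name) per med) with one newline-joined
-- lowercased corpus of all med names, testing each keyword once against that single string.


-- the literal keyword list both Pythons carry
def cardiacKeywords : List String :=
  ["metoprolol", "atenolol", "carvedilol", "bisoprolol",
   "amlodipine", "diltiazem", "verapamil", "nifedipine",
   "nitroglycerin", "isosorbide", "ranolazine",
   "lisinopril", "enalapril", "ramipril", "losartan", "valsartan",
   "atorvastatin", "rosuvastatin", "pravastatin",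
   "aspirin", "clopidogrel", "ticagrelor", "prasugrel",
   "warfarin", "apixaban", "rivaroxaban", "edoxaban",
   "amiodarone", "flecainide", "sotalol", "dofetilide",
   "furosemide", "bumetanide", "spironolactone", "eplerenone",
   "sacubitril", "hydralazine", "digoxin", "ivabradine"]

-- ===== PORT A =====
-- A's 'for med in meds: med_name = …; if any(kw in med_name): return True' loop
def hasMedA_loop : List (List (String × String)) → Bool
  | [] => false
  | med :: rest =>
    let med_name := PySem.Str.lower (PySem.Dict.getD (PySem.Dict.mk med) "name" "")
    if cardiacKeywords.any (fun kw => PySem.Str.isIn kw med_name) then true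
    else hasMedA_loop rest

def has_medication_trial_py (chart : List (String × List (List (String × String)))) : Bool :=
  let meds := PySem.Dict.getD (PySem.Dict.mk chart) "relevant_medications" []
  if meds.isEmpty then false
  else hasMedA_loop meds

-- ===== PORT B =====
def has_medication_trial_py_alt (chart : List (String × List (List (String × String)))) : Bool :=
  let corpus := PySem.Str.join "\n"
    ((PySem.Dict.getD (PySem.Dict.mk chart) "relevant_medications" []).map
      (fun med => PySem.Str.lower (PySem.Dict.getD (PySem.Dict.mk med) "name" "")))
  cardiacKeywords.any (fun kw => PySem.Str.isIn kw corpus)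

-- ===== PRECONDITION & SPEC =====
def Spec_has_medication_trial_py (chart : List (String × List (List (String × String)))) (out : Bool) : Prop := out = has_medication_trial_py_alt chart
instance (chart : List (String × List (List (String × String)))) (out : Bool) : Decidable (Spec_has_medication_trial_py chart out) := by unfold Spec_has_medication_trial_py; infer_instance

-- ===== CLAIM (what is proved, stated in full; the proofs are below) =====
def Claim_equal_has_medication_trial_py : Prop := ∀ (chart : List (String × List (List (String × String)))), Dom_has_medication_trial_py chart → Spec_has_medication_trial_py chart (has_medication_trial_py chart)

-- ===== LEMMAS AND PROOFS =====

-- an infix avoiding the separator element lies wholly on one side of it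
lemma infix_append_cons_iff {kw a b : List Char} {c : Char} (hc : c ∉ kw) :
    kw <:+: a ++ c :: b ↔ kw <:+: a ∨ kw <:+: b := by
  constructor
  · rintro ⟨s, t, hst⟩
    set j := s.length with hj
    have hdrop : kw ++ t = (a ++ c :: b).drop j := by
      rw [← hst]; simp [hj]
    rcases Nat.lt_or_ge a.length (j + kw.length) with hlt | hge
    · rcases Nat.lt_or_ge a.length j with hlt2 | hge2
      · -- j ≥ a.length + 1 : kw lies inside b
        right
        obtain ⟨k, hk⟩ : ∃ k, j = a.length + 1 + k := ⟨j - a.length - 1, by omega⟩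
        have hb : kw ++ t = b.drop k := by
          rw [hdrop, hk, show a ++ c :: b = (a ++ [c]) ++ b by simp,
              show a.length + 1 + k = (a ++ [c]).length + k by simp]
          rw [List.drop_append]
          simp
        exact ⟨b.take k, t, by rw [List.append_assoc, hb, List.take_append_drop]⟩
      · -- j ≤ a.length < j + kw.length : c would land inside kw, contradiction
        exfalso
        have hblen : a.length - j < kw.length := by omega
        have h1 : kw[a.length - j]? = (kw ++ t)[a.length - j]? :=
          (List.getElem?_append_left hblen).symm
        have h2 : (kw ++ t)[a.length - j]? = (a ++ c :: b)[a.length]? := by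
          rw [hdrop, List.getElem?_drop]
          congr 1
          omega
        have h3 : (a ++ c :: b)[a.length]? = some c := by
          rw [List.getElem?_append_right (le_refl _)]
          simp
        exact hc (List.mem_of_getElem? (h1.trans (h2.trans h3)))
    · -- kw lies inside a
      left
      have hsub : kw <+: (a ++ c :: b).drop j := ⟨t, hdrop⟩
      have hda : (a ++ c :: b).drop j = a.drop j ++ c :: b :=
        List.drop_append_of_le_length (by omega)
      rw [hda] at hsub
      obtain ⟨t2, ht2⟩ := hsub
      have hkwa : kw <+: a.drop j := by
        have he : kw = (a.drop j ++ c :: b).take kw.length := by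
          rw [← ht2, List.take_append_of_le_length (by simp)]
          simp
        rw [he, List.take_append_of_le_length (by simp; omega)]
        exact List.take_prefix _ _
      obtain ⟨t3, ht3⟩ := hkwa
      exact ⟨a.take j, t3, by rw [List.append_assoc, ht3, List.take_append_drop]⟩
  · rintro (⟨s, t, h⟩ | ⟨s, t, h⟩)
    · exact ⟨s, t ++ c :: b, by rw [← h]; simp⟩
    · exact ⟨a ++ c :: s, t, by rw [← h]; simp⟩

-- a keyword without '\n' is in the '\n'-joined corpus iff it is in some part
lemma isIn_joinNl {kw : List Char} (hne : kw ≠ []) (hc : ('\n' : Char) ∉ kw) :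
    ∀ parts : List (List Char),
      PySem.Chars.isIn kw (PySem.Chars.join ['\n'] parts)
        = parts.any (fun p => PySem.Chars.isIn kw p)
  | [] => by
      rw [PySem.Chars.join_nil]
      simp only [List.any_nil]
      rw [PySem.Chars.isIn_eq_false_iff]
      simp [hne]
  | [p] => by
      rw [PySem.Chars.join_singleton]
      simp
  | p :: q :: rest => by
      rw [PySem.Chars.join_cons_cons]
      have ih := isIn_joinNl hne hc (q :: rest)
      have key : PySem.Chars.isIn kw (p ++ ['\n'] ++ PySem.Chars.join ['\n'] (q :: rest))
          = (PySem.Chars.isIn kw p || PySem.Chars.isIn kw (PySem.Chars.join ['\n'] (q :: rest))) := by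
        rw [Bool.eq_iff_iff]
        rw [show p ++ ['\n'] ++ PySem.Chars.join ['\n'] (q :: rest)
              = p ++ '\n' :: PySem.Chars.join ['\n'] (q :: rest) by simp]
        rw [PySem.Chars.isIn_iff_infix]
        rw [infix_append_cons_iff hc]
        simp [PySem.Chars.isIn_iff_infix]
      rw [key, ih]
      simp

-- every keyword is a nonempty pure-letter string: no '\n' inside
lemma cardiacKeywords_facts :
    ∀ kw ∈ cardiacKeywords, kw.toList ≠ [] ∧ ('\n' : Char) ∉ kw.toList := by decide

-- A's loop is an 'any' over the meds
lemma hasMedA_loop_eq (meds : List (List (String × String))) :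
    hasMedA_loop meds
      = meds.any (fun med => cardiacKeywords.any (fun kw =>
          PySem.Str.isIn kw (PySem.Str.lower (PySem.Dict.getD (PySem.Dict.mk med) "name" "")))) := by
  induction meds with
  | nil => rfl
  | cons med rest ih =>
      rw [hasMedA_loop]
      simp only [List.any_cons]
      split_ifs with h
      · rw [h]
        rfl
      · simp only [h, Bool.false_or]
        exact ih

-- the keyword is in the corpus iff it is in some name
lemma isIn_corpus (kw : String) (hne : kw.toList ≠ []) (hc : ('\n' : Char) ∉ kw.toList)
    (names : List String) :
    PySem.Str.isIn kw (PySem.Str.join "\n" names) = names.any (fun n => PySem.Str.isIn kw n) := by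
  rw [PySem.Str.isIn_eq, PySem.Str.toList_join]
  rw [show ("\n" : String).toList = ['\n'] from rfl]
  rw [isIn_joinNl hne hc (names.map String.toList)]
  rw [List.any_map]
  rfl

lemma any_congr_mem {α : Type} {l : List α} {f g : α → Bool}
    (h : ∀ a ∈ l, f a = g a) : l.any f = l.any g := by
  induction l with
  | nil => rfl
  | cons x xs ih =>
      simp only [List.any_cons]
      rw [h x (by simp), ih (fun a ha => h a (by simp [ha]))]

lemma any_swap {α β : Type} (xs : List α) (ys : List β) (g : α → β → Bool) :
    xs.any (fun x => ys.any (fun y => g x y)) = ys.any (fun y => xs.any (fun x => g x y)) := by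
  rw [Bool.eq_iff_iff]
  simp only [List.any_eq_true]
  constructor
  · rintro ⟨x, hx, y, hy, h⟩; exact ⟨y, hy, x, hx, h⟩
  · rintro ⟨y, hy, x, hx, h⟩; exact ⟨x, hx, y, hy, h⟩

-- ===== VERDICT (by name: the statement is the Claim_ definition above) =====
theorem has_medication_trial_py_spec : Claim_equal_has_medication_trial_py := by
  intro chart _hdom
  unfold Spec_has_medication_trial_py has_medication_trial_py has_medication_trial_py_alt
  set meds := PySem.Dict.getD (PySem.Dict.mk chart) "relevant_medications" [] with hmeds
  have step1 : cardiacKeywords.any (fun kw => PySem.Str.isIn kw (PySem.Str.join "\n"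
        (meds.map (fun med => PySem.Str.lower (PySem.Dict.getD (PySem.Dict.mk med) "name" "")))))
      = cardiacKeywords.any (fun kw => meds.any (fun med =>
          PySem.Str.isIn kw (PySem.Str.lower (PySem.Dict.getD (PySem.Dict.mk med) "name" "")))) :=
    any_congr_mem (fun kw hkw => by
      rw [isIn_corpus kw (cardiacKeywords_facts kw hkw).1 (cardiacKeywords_facts kw hkw).2]
      rw [List.any_map]
      rfl)
  have hB : cardiacKeywords.any (fun kw => PySem.Str.isIn kw (PySem.Str.join "\n"
        (meds.map (fun med => PySem.Str.lower (PySem.Dict.getD (PySem.Dict.mk med) "name" "")))))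
      = meds.any (fun med => cardiacKeywords.any (fun kw =>
          PySem.Str.isIn kw (PySem.Str.lower (PySem.Dict.getD (PySem.Dict.mk med) "name" "")))) := by
    rw [step1]
    exact any_swap _ _ _
  rw [hB]
  cases meds with
  | nil => rfl
  | cons m rest =>
      show hasMedA_loop (m :: rest) = _
      exact hasMedA_loop_eq _
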